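-- pv_equiv track=rewrite | github.com/Knackie/telecom | Cours/1A/Promo 2021-2024/CS54/Algo/cs54-lab3-solution/knapsack.py | generic_find_all_best_loot_solutions_rec
-- ===== SOURCE A (Python) =====
-- from typing import List, Tuple
--
-- def weight(bag: List[bool], weights: List[int]):
--     return sum((weight * bag[index] for index, weight in enumerate(weights)))
--
-- def profit(bag: List[bool], prices: List[int]):
--     return sum((profit * bag[index] for index, profit in enumerate(prices)))
--
-- def generic_find_all_best_loot_solutions_rec(
--     capacity: int,
--     weights: List[int],
--     prices: List[int],
--     depth: int,
--     bag: List[bool],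
--     best_bags: List[List[bool]],
--     best_profit: int,
-- ) -> Tuple[int, List[List[bool]]]:
--     """This function looks for all the best solutions of the knapsack problem
--     (which objects to take to maximise the profit while keeping  total weight of the bag below its initial capacity).
--
--     **This function is written using the classical template of a backtracking search.**
--
--     Args:
--         capacity (int): initial capacity of the bag. It is not updated during the lookup.
--         weights (List[int]): objects weights.
--         prices (List[int]): objects prices.
--         depth (int): lookup depth.
--         bag (List[bool]): current bag, bag[i] is True is object i is inside the bag.
--         best_bags (List[List[bool]]): best solutions found until now.
--         best_profit (int): profit of the best bags (of course, all best bags have the same profit).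
--
--     Returns:
--         Tuple[int, List[List[bool]]: tuple that contains (maximal profit found, list of all bests bags whose profit is maximal).
--     """
--     if depth >= len(weights):
--         return best_profit, best_bags
--
--     for action in [True, False]:
--         # store "old state"
--         old_value = bag[depth]
--
--         # perform "action"
--         bag[depth] = action
--
--         if weight(bag, weights) <= capacity:
--             expected_profit = profit(bag, prices)
--             if expected_profit >= best_profit:
--                 if expected_profit > best_profit:
--                     best_bags.clear()
--                 if bag not in best_bags:
--                     best_bags.append(list(bag))  # make a copy of bag
--                 best_profit = expected_profit
--
--             best_profit, best_bags = generic_find_all_best_loot_solutions_rec(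
--                 capacity, weights, prices, depth + 1, bag, best_bags, best_profit
--             )
--
--         # cancel "action" / restore "old state"
--         bag[depth] = old_value
--
--     return best_profit, best_bags
-- ===== SOURCE B (Python) =====
-- from typing import List, Tuple
--
--
-- def weight(bag: List[bool], weights: List[int]):
--     return sum((weight * bag[index] for index, weight in enumerate(weights)))
--
--
-- def profit(bag: List[bool], prices: List[int]):
--     return sum((profit * bag[index] for index, profit in enumerate(prices)))
--
--
-- def generic_find_all_best_loot_solutions_rec(
--     capacity: int,
--     weights: List[int],
--     prices: List[int],
--     depth: int,
--     bag: List[bool],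
--     best_bags: List[List[bool]],
--     best_profit: int,
-- ) -> Tuple[int, List[List[bool]]]:
--     """Iterative depth-first search over an explicit stack instead of recursion.
--
--     Each stack frame is (depth, bag snapshot, action); popping a frame applies
--     the action to a fresh copy of the snapshot, so no undo step is needed.
--     False is pushed before True, reproducing the True-before-False pre-order
--     of the backtracking search.
--     """
--     n = len(weights)
--     if depth >= n:
--         return best_profit, best_bags
--
--     stack = [(depth, bag, False), (depth, bag, True)]
--     while stack:
--         d, snapshot, action = stack.pop()
--         new_bag = list(snapshot)
--         new_bag[d] = action
--         if weight(new_bag, weights) <= capacity: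
--             expected_profit = profit(new_bag, prices)
--             if expected_profit >= best_profit:
--                 if expected_profit > best_profit:
--                     best_bags.clear()
--                 if new_bag not in best_bags:
--                     best_bags.append(list(new_bag))
--                 best_profit = expected_profit
--             if d + 1 < n:
--                 stack.append((d + 1, new_bag, False))
--                 stack.append((d + 1, new_bag, True))
--     return best_profit, best_bags
-- ===== Notes on version B (the rewrite author's own statement) =====
-- stated objective: alternative
-- what changed: The recursive backtracker with in-place mutate/undo of bag is replaced by an iterative depth-first search over an explicit stack of (depth, bag-snapshot, action) frames, pushing False before True so the True-first pre-order and hence the exact best_profit/best_bags updates are reproduced without recursion or an undo step. Pre_ excludes inputs where bag is shorter than weights or prices, or depth indexes below -len(bag), on which the Python indexes bag out of range and raises IndexError; …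
-- outside the precondition, e.g. on generic_find_all_best_loot_solutions_rec(-1, [1], [1, 2], 0, [False], [], 0): A returns (0, []), B returns (0, [])
import Mathlib
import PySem

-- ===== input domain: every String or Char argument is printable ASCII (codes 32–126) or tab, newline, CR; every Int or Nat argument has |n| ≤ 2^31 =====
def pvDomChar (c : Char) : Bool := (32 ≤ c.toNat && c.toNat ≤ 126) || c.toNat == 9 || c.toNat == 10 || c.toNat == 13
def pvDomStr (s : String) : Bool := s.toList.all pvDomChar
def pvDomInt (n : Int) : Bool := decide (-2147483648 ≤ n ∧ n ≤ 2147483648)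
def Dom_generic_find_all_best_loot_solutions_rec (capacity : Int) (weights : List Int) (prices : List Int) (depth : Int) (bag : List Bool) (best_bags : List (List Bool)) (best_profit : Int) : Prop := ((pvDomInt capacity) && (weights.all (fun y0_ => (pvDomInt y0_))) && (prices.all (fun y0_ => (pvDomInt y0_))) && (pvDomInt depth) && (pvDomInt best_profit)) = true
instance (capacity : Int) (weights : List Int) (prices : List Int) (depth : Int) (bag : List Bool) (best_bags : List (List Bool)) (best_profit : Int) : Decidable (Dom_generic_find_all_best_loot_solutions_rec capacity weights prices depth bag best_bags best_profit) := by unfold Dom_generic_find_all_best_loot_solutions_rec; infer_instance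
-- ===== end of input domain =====

-- B replaces the recursive backtracker by an iterative depth-first search over an explicit
-- stack of (depth, bag snapshot, action) frames (alternative decomposition, same cost).
-- Both Pythons mutate best_bags in place (clear/append) and A temporarily mutates bag
-- (restored before returning); the equivalence proved here is about the RETURN value only.

-- ===== PORT A =====
-- Port of both module helpers weight() and profit() (their code is identical):
-- sum(x * bag[i] for i, x in enumerate(xs)).  bag[i] is read with pyGetD with default
-- false: the default is never reached on Pre_ (Python raises IndexError there).
def dotBag (bag : List Bool) (xs : List Int) : Int :=
  ((PySem.List.enumerate xs 0).map
    (fun iw => iw.2 * (if PySem.List.pyGetD bag iw.1 false then 1 else 0))).sum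

-- A's recursion, totalized with a fuel argument; the wrapper passes
-- fuel = (len(weights) - depth).toNat, so the fuel-0 branch is never reached.
-- A mutates bag[depth] and restores it after each action, so the original `bag` is what
-- the second action and the caller see; the port passes the written copy only downwards.
def aGo (capacity : Int) (weights : List Int) (prices : List Int) : Nat → Int → List Bool → List (List Bool) → Int → Int × List (List Bool)
  | fuel, depth, bag, best_bags, best_profit =>
    if depth ≥ (weights.length : Int) then (best_profit, best_bags)
    else
      match fuel with
      | 0 => (best_profit, best_bags)  -- unreachable from the wrapper (fuel is positive here)
      | fuel + 1 =>
        -- for action in [True, False]: first iteration, action = True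
        let bagT := PySem.List.pySetD bag depth true
        let st1 :=
          if dotBag bagT weights ≤ capacity then
            let ep := dotBag bagT prices
            let st0 :=
              if ep ≥ best_profit then
                let bb1 := if ep > best_profit then [] else best_bags
                let bb2 := if bagT ∈ bb1 then bb1 else bb1 ++ [bagT]
                (ep, bb2)
              else (best_profit, best_bags)
            aGo capacity weights prices fuel (depth + 1) bagT st0.2 st0.1
          else (best_profit, best_bags)
        -- second iteration, action = False
        let bagF := PySem.List.pySetD bag depth false
        if dotBag bagF weights ≤ capacity then
          let ep := dotBag bagF prices
          let st0 :=
            if ep ≥ st1.1 then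
              let bb1 := if ep > st1.1 then [] else st1.2
              let bb2 := if bagF ∈ bb1 then bb1 else bb1 ++ [bagF]
              (ep, bb2)
            else st1
          aGo capacity weights prices fuel (depth + 1) bagF st0.2 st0.1
        else st1

def generic_find_all_best_loot_solutions_rec (capacity : Int) (weights : List Int) (prices : List Int) (depth : Int) (bag : List Bool) (best_bags : List (List Bool)) (best_profit : Int) : Int × List (List Bool) :=
  aGo capacity weights prices ((weights.length : Int) - depth).toNat depth bag best_bags best_profit

-- ===== PORT B =====
-- The while-stack loop of Source B; the list head is the top of the Python stack
-- (stack.pop() pops the head, stack.append pushes in front).  Totalized with a fuel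
-- argument: the wrapper passes fuel = 2 * 3^(len(weights) - depth), an upper bound on
-- the number of iterations, so the fuel-0 branch is never reached.
def altLoop (capacity : Int) (weights : List Int) (prices : List Int) : Nat → List (Int × List Bool × Bool) → Int → List (List Bool) → Int × List (List Bool)
  | fuel, stack, best_profit, best_bags =>
    match stack with
    | [] => (best_profit, best_bags)
    | (d, snapshot, action) :: rest =>
      match fuel with
      | 0 => (best_profit, best_bags)  -- unreachable from the wrapper
      | fuel + 1 =>
        let nb := PySem.List.pySetD snapshot d action
        if dotBag nb weights ≤ capacity then
          let ep := dotBag nb prices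
          let st :=
            if ep ≥ best_profit then
              let bb1 := if ep > best_profit then [] else best_bags
              let bb2 := if nb ∈ bb1 then bb1 else bb1 ++ [nb]
              (ep, bb2)
            else (best_profit, best_bags)
          if d + 1 < (weights.length : Int) then
            altLoop capacity weights prices fuel ((d + 1, nb, true) :: (d + 1, nb, false) :: rest) st.1 st.2
          else
            altLoop capacity weights prices fuel rest st.1 st.2
        else
          altLoop capacity weights prices fuel rest best_profit best_bags

def generic_find_all_best_loot_solutions_rec_alt (capacity : Int) (weights : List Int) (prices : List Int) (depth : Int) (bag : List Bool) (best_bags : List (List Bool)) (best_profit : Int) : Int × List (List Bool) :=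
  if depth ≥ (weights.length : Int) then (best_profit, best_bags)
  else
    altLoop capacity weights prices (2 * 3 ^ ((weights.length : Int) - depth).toNat)
      [(depth, bag, true), (depth, bag, false)] best_profit best_bags

-- ===== PRECONDITION & SPEC =====
-- Pre_ excludes inputs where bag is shorter than weights or prices, or depth indexes below
-- -len(bag): on these the Python indexes bag out of range and raises IndexError (when prices
-- is the over-long list and capacity prunes every branch before profit() runs, A happens to
-- return and B returns the identical value, so Pre_ is slightly narrower than the raising set).
def Pre_generic_find_all_best_loot_solutions_rec (capacity : Int) (weights : List Int) (prices : List Int) (depth : Int) (bag : List Bool) (best_bags : List (List Bool)) (best_profit : Int) : Prop :=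
  depth ≥ (weights.length : Int) ∨
    (weights.length ≤ bag.length ∧ prices.length ≤ bag.length ∧ -(bag.length : Int) ≤ depth)
instance (capacity : Int) (weights : List Int) (prices : List Int) (depth : Int) (bag : List Bool) (best_bags : List (List Bool)) (best_profit : Int) : Decidable (Pre_generic_find_all_best_loot_solutions_rec capacity weights prices depth bag best_bags best_profit) := by unfold Pre_generic_find_all_best_loot_solutions_rec; infer_instance

def pvWitness_generic_find_all_best_loot_solutions_rec : Int × List Int × List Int × Int × List Bool × List (List Bool) × Int :=
  (10, [2, 3], [4, 5], 0, [false, false], [], 0)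

def Spec_generic_find_all_best_loot_solutions_rec (capacity : Int) (weights : List Int) (prices : List Int) (depth : Int) (bag : List Bool) (best_bags : List (List Bool)) (best_profit : Int) (out : Int × List (List Bool)) : Prop := out = generic_find_all_best_loot_solutions_rec_alt capacity weights prices depth bag best_bags best_profit
instance (capacity : Int) (weights : List Int) (prices : List Int) (depth : Int) (bag : List Bool) (best_bags : List (List Bool)) (best_profit : Int) (out : Int × List (List Bool)) : Decidable (Spec_generic_find_all_best_loot_solutions_rec capacity weights prices depth bag best_bags best_profit out) := by unfold Spec_generic_find_all_best_loot_solutions_rec; infer_instance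

-- ===== CLAIM (what is proved, stated in full; the proofs are below) =====
def Claim_equal_generic_find_all_best_loot_solutions_rec : Prop := ∀ (capacity : Int) (weights : List Int) (prices : List Int) (depth : Int) (bag : List Bool) (best_bags : List (List Bool)) (best_profit : Int), Dom_generic_find_all_best_loot_solutions_rec capacity weights prices depth bag best_bags best_profit → Pre_generic_find_all_best_loot_solutions_rec capacity weights prices depth bag best_bags best_profit → Spec_generic_find_all_best_loot_solutions_rec capacity weights prices depth bag best_bags best_profit (generic_find_all_best_loot_solutions_rec capacity weights prices depth bag best_bags best_profit)

-- ===== LEMMAS AND PROOFS =====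

-- A's loop body for one action (with explicit fuel for the recursive call).
def oneActionF (capacity : Int) (weights : List Int) (prices : List Int) (fuel : Nat) (d : Int) (b : List Bool) (a : Bool) (bp : Int) (bb : List (List Bool)) : Int × List (List Bool) :=
  let nb := PySem.List.pySetD b d a
  if dotBag nb weights ≤ capacity then
    let ep := dotBag nb prices
    let st0 :=
      if ep ≥ bp then
        let bb1 := if ep > bp then [] else bb
        let bb2 := if nb ∈ bb1 then bb1 else bb1 ++ [nb]
        (ep, bb2)
      else (bp, bb)
    aGo capacity weights prices fuel (d + 1) nb st0.2 st0.1
  else (bp, bb)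

-- A's loop body for one action, with the recursive call made through the wrapper.
def oneAction (capacity : Int) (weights : List Int) (prices : List Int) (d : Int) (b : List Bool) (a : Bool) (bp : Int) (bb : List (List Bool)) : Int × List (List Bool) :=
  let nb := PySem.List.pySetD b d a
  if dotBag nb weights ≤ capacity then
    let ep := dotBag nb prices
    let st0 :=
      if ep ≥ bp then
        let bb1 := if ep > bp then [] else bb
        let bb2 := if nb ∈ bb1 then bb1 else bb1 ++ [nb]
        (ep, bb2)
      else (bp, bb)
    generic_find_all_best_loot_solutions_rec capacity weights prices (d + 1) nb st0.2 st0.1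
  else (bp, bb)

lemma aGo_leaf (capacity : Int) (weights : List Int) (prices : List Int) (fuel : Nat) (d : Int) (b : List Bool) (bb : List (List Bool)) (bp : Int) (hd : d ≥ (weights.length : Int)) :
    aGo capacity weights prices fuel d b bb bp = (bp, bb) := by
  cases fuel <;> simp only [aGo, if_pos hd]

lemma aGo_step (capacity : Int) (weights : List Int) (prices : List Int) (fuel : Nat) (d : Int) (b : List Bool) (bb : List (List Bool)) (bp : Int) (hd : ¬ d ≥ (weights.length : Int)) :
    aGo capacity weights prices (fuel + 1) d b bb bp =
      (fun p : Int × List (List Bool) => oneActionF capacity weights prices fuel d b false p.1 p.2)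
        (oneActionF capacity weights prices fuel d b true bp bb) := by
  simp only [aGo, oneActionF, if_neg hd]

lemma oneActionF_eq_oneAction (capacity : Int) (weights : List Int) (prices : List Int) (d : Int) (b : List Bool) (a : Bool) (bp : Int) (bb : List (List Bool)) :
    oneActionF capacity weights prices ((weights.length : Int) - (d + 1)).toNat d b a bp bb =
      oneAction capacity weights prices d b a bp bb := by
  simp only [oneActionF, oneAction, generic_find_all_best_loot_solutions_rec]

lemma A_leaf (capacity : Int) (weights : List Int) (prices : List Int) (d : Int) (b : List Bool) (bb : List (List Bool)) (bp : Int) (hd : d ≥ (weights.length : Int)) :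
    generic_find_all_best_loot_solutions_rec capacity weights prices d b bb bp = (bp, bb) := by
  unfold generic_find_all_best_loot_solutions_rec
  exact aGo_leaf _ _ _ _ _ _ _ _ hd

-- A at a non-leaf node is the True action followed by the False action.
lemma A_eq_two_actions (capacity : Int) (weights : List Int) (prices : List Int) (d : Int) (b : List Bool) (bb : List (List Bool)) (bp : Int) (hd : ¬ d ≥ (weights.length : Int)) :
    generic_find_all_best_loot_solutions_rec capacity weights prices d b bb bp =
      (fun p : Int × List (List Bool) => oneAction capacity weights prices d b false p.1 p.2)
        (oneAction capacity weights prices d b true bp bb) := by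
  unfold generic_find_all_best_loot_solutions_rec
  have hf : ((weights.length : Int) - d).toNat = ((weights.length : Int) - (d + 1)).toNat + 1 := by omega
  rw [hf, aGo_step _ _ _ _ _ _ _ _ hd]
  simp only [oneActionF_eq_oneAction]

-- The 3-adic weight of a stack: an upper bound on the number of loop iterations it causes.
def pvM (weights : List Int) (stack : List (Int × List Bool × Bool)) : Nat :=
  (stack.map (fun f => 3 ^ ((weights.length : Int) - f.1).toNat)).sum

lemma altLoop_nil (capacity : Int) (weights : List Int) (prices : List Int) (fuel : Nat) (bp : Int) (bb : List (List Bool)) :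
    altLoop capacity weights prices fuel [] bp bb = (bp, bb) := by
  cases fuel <;> simp only [altLoop]

-- Any fuel at least the stack's 3-adic weight computes the same value.
lemma altLoop_fuel (capacity : Int) (weights : List Int) (prices : List Int) :
    ∀ (f1 : Nat) (stack : List (Int × List Bool × Bool)) (bp : Int) (bb : List (List Bool)) (f2 : Nat),
      pvM weights stack ≤ f1 → pvM weights stack ≤ f2 →
      altLoop capacity weights prices f1 stack bp bb = altLoop capacity weights prices f2 stack bp bb := by
  intro f1
  induction f1 with
  | zero =>
    intro stack bp bb f2 h1 _h2
    cases stack with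
    | nil => rw [altLoop_nil, altLoop_nil]
    | cons fr rest =>
      exfalso
      have : 0 < 3 ^ ((weights.length : Int) - fr.1).toNat := pow_pos (by norm_num) _
      simp only [pvM, List.map_cons, List.sum_cons] at h1
      omega
  | succ f ih =>
    intro stack bp bb f2 h1 h2
    cases stack with
    | nil => rw [altLoop_nil, altLoop_nil]
    | cons fr rest =>
      obtain ⟨d, snap, a⟩ := fr
      have hpos : 0 < 3 ^ ((weights.length : Int) - d).toNat := pow_pos (by norm_num) _
      simp only [pvM, List.map_cons, List.sum_cons] at h1 h2
      obtain ⟨f2', rfl⟩ : ∃ k, f2 = k + 1 := by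
        cases f2 with
        | zero => exfalso; omega
        | succ k => exact ⟨k, rfl⟩
      simp only [altLoop]
      split
      · split
        · rename_i hnext
          apply ih
          · have he : ((weights.length : Int) - d).toNat = ((weights.length : Int) - (d + 1)).toNat + 1 := by omega
            have hp : 0 < 3 ^ ((weights.length : Int) - (d + 1)).toNat := pow_pos (by norm_num) _
            simp only [pvM, List.map_cons, List.sum_cons]
            rw [he, pow_succ] at h1
            omega
          · have he : ((weights.length : Int) - d).toNat = ((weights.length : Int) - (d + 1)).toNat + 1 := by omega
            have hp : 0 < 3 ^ ((weights.length : Int) - (d + 1)).toNat := pow_pos (by norm_num) _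
            simp only [pvM, List.map_cons, List.sum_cons]
            rw [he, pow_succ] at h2
            omega
        · exact ih rest _ _ f2' (by simp only [pvM]; omega) (by simp only [pvM]; omega)
      · exact ih rest _ _ f2' (by simp only [pvM]; omega) (by simp only [pvM]; omega)

-- Processing one stack frame in B computes exactly A's one-action result for that frame,
-- and then continues with the rest of the stack.
lemma altLoop_frame (capacity : Int) (weights : List Int) (prices : List Int) :
    ∀ (k : Nat) (d : Int), ((weights.length : Int) - d).toNat ≤ k →
      ∀ (b : List Bool) (a : Bool) (rest : List (Int × List Bool × Bool)) (bp : Int) (bb : List (List Bool)) (fuel : Nat),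
        pvM weights ((d, b, a) :: rest) ≤ fuel →
        altLoop capacity weights prices fuel ((d, b, a) :: rest) bp bb =
          altLoop capacity weights prices (pvM weights rest) rest
            (oneAction capacity weights prices d b a bp bb).1
            (oneAction capacity weights prices d b a bp bb).2 := by
  intro k
  induction k with
  | zero =>
    intro d hk b a rest bp bb fuel hfuel
    have hd : d ≥ (weights.length : Int) := by omega
    have hpos : 0 < 3 ^ ((weights.length : Int) - d).toNat := pow_pos (by norm_num) _
    simp only [pvM, List.map_cons, List.sum_cons] at hfuel
    obtain ⟨f', rfl⟩ : ∃ m, fuel = m + 1 := by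
      cases fuel with
      | zero => exfalso; omega
      | succ m => exact ⟨m, rfl⟩
    simp only [altLoop, oneAction]
    split
    · rw [if_neg (by omega : ¬ d + 1 < (weights.length : Int))]
      rw [A_leaf capacity weights prices (d + 1) _ _ _ (by omega)]
      exact altLoop_fuel _ _ _ f' rest _ _ _ (by simp only [pvM]; omega) (le_refl _)
    · exact altLoop_fuel _ _ _ f' rest _ _ _ (by simp only [pvM]; omega) (le_refl _)
  | succ k ih =>
    intro d hk b a rest bp bb fuel hfuel
    have hpos : 0 < 3 ^ ((weights.length : Int) - d).toNat := pow_pos (by norm_num) _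
    simp only [pvM, List.map_cons, List.sum_cons] at hfuel
    obtain ⟨f', rfl⟩ : ∃ m, fuel = m + 1 := by
      cases fuel with
      | zero => exfalso; omega
      | succ m => exact ⟨m, rfl⟩
    by_cases hd : d ≥ (weights.length : Int)
    · -- leaf frame: same argument as the base case
      simp only [altLoop, oneAction]
      split
      · rw [if_neg (by omega : ¬ d + 1 < (weights.length : Int))]
        rw [A_leaf capacity weights prices (d + 1) _ _ _ (by omega)]
        exact altLoop_fuel _ _ _ f' rest _ _ _ (by simp only [pvM]; omega) (le_refl _)
      · exact altLoop_fuel _ _ _ f' rest _ _ _ (by simp only [pvM]; omega) (le_refl _)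
    · simp only [altLoop, oneAction]
      split
      · by_cases hnext : d + 1 < (weights.length : Int)
        · rw [if_pos hnext]
          have hk1 : ((weights.length : Int) - (d + 1)).toNat ≤ k := by omega
          have he : ((weights.length : Int) - d).toNat = ((weights.length : Int) - (d + 1)).toNat + 1 := by omega
          have hp : 0 < 3 ^ ((weights.length : Int) - (d + 1)).toNat := pow_pos (by norm_num) _
          rw [he, pow_succ] at hfuel
          rw [ih (d + 1) hk1 _ _ _ _ _ f' (by simp only [pvM, List.map_cons, List.sum_cons]; omega)]
          rw [ih (d + 1) hk1 _ _ _ _ _ _ (by simp only [pvM, List.map_cons, List.sum_cons]; omega)]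
          rw [A_eq_two_actions capacity weights prices (d + 1) _ _ _ (by omega)]
        · rw [if_neg hnext]
          rw [A_leaf capacity weights prices (d + 1) _ _ _ (by omega)]
          exact altLoop_fuel _ _ _ f' rest _ _ _ (by simp only [pvM]; omega) (le_refl _)
      · exact altLoop_fuel _ _ _ f' rest _ _ _ (by simp only [pvM]; omega) (le_refl _)

-- ===== VERDICT (by name: the statement is the Claim_ definition above) =====
theorem generic_find_all_best_loot_solutions_rec_spec : Claim_equal_generic_find_all_best_loot_solutions_rec := by
  unfold Claim_equal_generic_find_all_best_loot_solutions_rec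
  intro capacity weights prices depth bag best_bags best_profit _hdom _hpre
  unfold Spec_generic_find_all_best_loot_solutions_rec
  unfold generic_find_all_best_loot_solutions_rec_alt
  by_cases h : depth ≥ (weights.length : Int)
  · rw [if_pos h, A_leaf capacity weights prices depth bag best_bags best_profit h]
  · rw [if_neg h]
    have hpos : 0 < 3 ^ ((weights.length : Int) - depth).toNat := pow_pos (by norm_num) _
    rw [altLoop_frame capacity weights prices ((weights.length : Int) - depth).toNat depth (le_refl _)
        bag true [(depth, bag, false)] best_profit best_bags _
        (by simp only [pvM, List.map_cons, List.map_nil, List.sum_cons, List.sum_nil]; omega)]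
    rw [altLoop_frame capacity weights prices ((weights.length : Int) - depth).toNat depth (le_refl _)
        bag false [] _ _ _
        (by simp only [pvM, List.map_cons, List.map_nil, List.sum_cons, List.sum_nil]; omega)]
    rw [altLoop_nil]
    rw [A_eq_two_actions capacity weights prices depth bag best_bags best_profit h]
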